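-- pv_equiv track=rewrite | github.com/mendamgalan/40_bodlogo | bodlogo-14/Ema'sSuperCom.py | get_pluses
-- ===== SOURCE A (Python) =====
-- def get_pluses(grid):
--     rows = len(grid)
--     cols = len(grid[0])
--     pluses = []
--
--     for r in range(rows):
--         for c in range(cols):
--             if grid[r][c] != 'G':
--                 continue
--
--             length = 0
--             while True:
--                 try:
--                     if (r - length < 0 or r + length >= rows or
--                         c - length < 0 or c + length >= cols or
--                         grid[r - length][c] != 'G' or
--                         grid[r + length][c] != 'G' or
--                         grid[r][c - length] != 'G' or
--                         grid[r][c + length] != 'G'):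
--                         break
--                 except:
--                     break
--
--                 cells = set()
--                 cells.add((r, c))
--                 for i in range(1, length + 1):
--                     cells.add((r - i, c))
--                     cells.add((r + i, c))
--                     cells.add((r, c - i))
--                     cells.add((r, c + i))
--
--                 area = 1 + length * 4
--                 pluses.append((area, cells))
--                 length += 1
--
--     return pluses
-- ===== SOURCE B (Python) =====
-- def get_pluses(grid):
--     rows = len(grid)
--     cols = len(grid[0])
--     g = [[grid[r][c] == 'G' for c in range(cols)] for r in range(rows)]
--
--     def scan(bs):
--         out, k = [], 0
--         for b in bs:
--             k = k + 1 if b else 0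
--             out.append(k)
--         return out
--
--     # dynamic-programming arm tables: consecutive-'G' run length ending at each
--     # cell, looking up/down/left/right (the cell itself included)
--     up, prev = [], [0] * cols
--     for row in g:
--         prev = [(u + 1 if b else 0) for b, u in zip(row, prev)]
--         up.append(prev)
--     down, prev = [], [0] * cols
--     for row in reversed(g):
--         prev = [(u + 1 if b else 0) for b, u in zip(row, prev)]
--         down.append(prev)
--     down.reverse()
--     left = [scan(row) for row in g]
--     right = [scan(row[::-1])[::-1] for row in g]
--
--     pluses = []
--     for r in range(rows):
--         for c in range(cols):
--             if not g[r][c]: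
--                 continue
--             L = min(up[r][c], down[r][c], left[r][c], right[r][c]) - 1
--             cells = {(r, c)}
--             pluses.append((1, set(cells)))
--             for n in range(1, L + 1):
--                 cells |= {(r - n, c), (r + n, c), (r, c - n), (r, c + n)}
--                 pluses.append((1 + 4 * n, set(cells)))
--     return pluses
-- ===== Notes on version B (the rewrite author's own statement) =====
-- stated objective: alternative
-- what changed: A grows each plus at its centre with a lockstep while-loop that re-tests all four directions at every length and rebuilds the cell set from scratch; B first builds four dynamic-programming run-length tables (up/down/left/right) in staged passes over the whole grid, then reads each centre's maximal arm length as a table minimum and generates the pluses incrementally.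
-- outside the precondition, e.g. on get_pluses([]): A raises IndexError, B raises IndexError; on get_pluses([['G', 'G'], ['G']]): A raises IndexError, B raises IndexError
import Mathlib
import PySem

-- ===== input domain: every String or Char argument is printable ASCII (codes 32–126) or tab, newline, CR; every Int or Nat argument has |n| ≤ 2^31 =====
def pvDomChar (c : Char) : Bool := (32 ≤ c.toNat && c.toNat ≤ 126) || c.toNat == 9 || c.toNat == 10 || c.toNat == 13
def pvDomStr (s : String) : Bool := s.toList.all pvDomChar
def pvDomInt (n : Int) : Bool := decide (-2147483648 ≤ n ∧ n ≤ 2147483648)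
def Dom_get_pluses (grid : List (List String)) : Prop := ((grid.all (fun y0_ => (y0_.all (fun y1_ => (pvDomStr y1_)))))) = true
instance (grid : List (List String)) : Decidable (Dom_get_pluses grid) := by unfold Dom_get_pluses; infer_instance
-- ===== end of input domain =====

-- B replaces A's per-center lockstep grow-and-test while-loop by four dynamic-programming
-- run-length tables (up/down/left/right) built in staged passes over the grid, then emits each
-- centre's pluses from the table minimum (objective: alternative algorithm).

-- ===== PORT A =====
-- grid[i][j]; both programs only evaluate it behind in-bounds guards (short-circuit), so a total form is exact there
def pvAt (grid : List (List String)) (i j : Int) : String :=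
  (grid.getD i.toNat []).getD j.toNat ""

-- the cells set A rebuilds from scratch at each length: {(r,c)} then for i in range(1, l+1) add the four arm cells
def pvCells (r c l : Int) : PySem.Set (Int × Int) :=
  (PySem.List.pyRange 1 (l + 1) 1).foldl
    (fun s i => (((PySem.Set.add s (r - i, c)).add (r + i, c)).add (r, c - i)).add (r, c + i))
    (PySem.Set.add PySem.Set.empty (r, c))

-- the break condition of A's 'while True'
def pvBreak (grid : List (List String)) (rows cols r c l : Int) : Bool :=
  decide (r - l < 0) || decide (rows ≤ r + l) || decide (c - l < 0) || decide (cols ≤ c + l) ||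
  decide (pvAt grid (r - l) c ≠ "G") || decide (pvAt grid (r + l) c ≠ "G") ||
  decide (pvAt grid r (c - l) ≠ "G") || decide (pvAt grid r (c + l) ≠ "G")

-- A's inner while loop (fuel makes it total; rows+1 iterations always suffice: the loop breaks once r - length < 0)
def pvALoop (grid : List (List String)) (rows cols r c : Int) :
    Nat → Int → List (Int × (List (Int × Int))) → List (Int × (List (Int × Int)))
  | 0, _, acc => acc
  | f + 1, l, acc =>
    if pvBreak grid rows cols r c l then acc
    else pvALoop grid rows cols r c f (l + 1) (acc ++ [(1 + l * 4, pvCells r c l)])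

def get_pluses (grid : List (List String)) : List (Int × (List (Int × Int))) :=
  let rows : Int := grid.length
  let cols : Int := (grid.headD []).length
  (PySem.List.pyRange 0 rows 1).foldl (fun acc r =>
    (PySem.List.pyRange 0 cols 1).foldl (fun acc c =>
      if pvAt grid r c ≠ "G" then acc
      else pvALoop grid rows cols r c (grid.length + 1) 0 acc) acc) []

-- ===== PORT B =====
-- g = [[grid[r][c] == 'G' for c in range(cols)] for r in range(rows)]
def pvG (grid : List (List String)) : List (List Bool) :=
  grid.map (fun row =>
    (PySem.List.pyRange 0 ((grid.headD []).length : Int) 1).map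
      (fun c => row.getD c.toNat "" == "G"))

-- prev = [(u + 1 if b else 0) for b, u in zip(row, prev)]
def pvZipStep (row : List Bool) (prev : List Int) : List Int :=
  (row.zip prev).map (fun p => if p.1 then p.2 + 1 else 0)

-- the up/down table loop of Source B: fold over the rows, carrying the previous table row
def pvUpRows : List (List Bool) → List Int → List (List Int)
  | [], _ => []
  | row :: gs, prev =>
    let cur := pvZipStep row prev
    cur :: pvUpRows gs cur

-- Source B's scan helper: left-to-right run lengths within one row, carrying k
def pvScan : List Bool → Int → List Int
  | [], _ => []
  | b :: bs, k =>
    let k' := if b then k + 1 else 0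
    k' :: pvScan bs k'

-- g[r][c] / table[r][c] (Source B only reads them in range)
def pvGB (g : List (List Bool)) (r c : Int) : Bool := (g.getD r.toNat []).getD c.toNat false
def pvTab (t : List (List Int)) (r c : Int) : Int := (t.getD r.toNat []).getD c.toNat 0

-- the generation loop of Source B: cells = {(r,c)}; append (1, set(cells)); then grow for n = 1..L
def pvBGen (r c L : Int) (acc : List (Int × (List (Int × Int)))) :
    List (Int × (List (Int × Int))) :=
  let cells0 : PySem.Set (Int × Int) := PySem.Set.ofList [(r, c)]
  (((PySem.List.pyRange 1 (L + 1) 1).foldl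
      (fun (st : PySem.Set (Int × Int) × List (Int × (List (Int × Int)))) n =>
        let cs := (((PySem.Set.add st.1 (r - n, c)).add (r + n, c)).add (r, c - n)).add (r, c + n)
        (cs, st.2 ++ [(1 + 4 * n, cs)]))
      (cells0, acc ++ [(1, cells0)]))).2

def get_pluses_alt (grid : List (List String)) : List (Int × (List (Int × Int))) :=
  let rows : Int := grid.length
  let cols : Int := (grid.headD []).length
  let g := pvG grid
  let prev0 : List Int := List.replicate cols.toNat 0
  let up := pvUpRows g prev0
  let down := (pvUpRows g.reverse prev0).reverse
  let left := g.map (fun row => pvScan row 0)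
  let right := g.map (fun row => (pvScan row.reverse 0).reverse)
  (PySem.List.pyRange 0 rows 1).foldl (fun acc r =>
    (PySem.List.pyRange 0 cols 1).foldl (fun acc c =>
      if pvGB g r c = false then acc
      else
        pvBGen r c
          (min (min (min (pvTab up r c) (pvTab down r c)) (pvTab left r c)) (pvTab right r c) - 1)
          acc) acc) []

-- ===== PRECONDITION & SPEC =====
-- A raises IndexError on an empty grid (len(grid[0])) and on ragged grids whose row 0 is longer
-- than some other row (the unguarded grid[r][c] of the outer loop); Pre_ excludes exactly those.
def Pre_get_pluses (grid : List (List String)) : Prop :=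
  grid ≠ [] ∧ ∀ row ∈ grid, (grid.headD []).length ≤ row.length
instance (grid : List (List String)) : Decidable (Pre_get_pluses grid) := by
  unfold Pre_get_pluses; infer_instance

def pvWitness_get_pluses : List (List String) := [["G", "G"], ["G", "."]]

def Spec_get_pluses (grid : List (List String)) (out : List (Int × (List (Int × Int)))) : Prop := out = get_pluses_alt grid
instance (grid : List (List String)) (out : List (Int × (List (Int × Int)))) : Decidable (Spec_get_pluses grid out) := by unfold Spec_get_pluses; infer_instance

-- ===== CLAIM (what is proved, stated in full; the proofs are below) =====
def Claim_equal_get_pluses : Prop := ∀ (grid : List (List String)), Dom_get_pluses grid → Pre_get_pluses grid → Spec_get_pluses grid (get_pluses grid)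

-- ===== LEMMAS AND PROOFS =====

-- the four arm predicates of A's per-length break test (proof-side characterisation)
def pvOkU (grid : List (List String)) (r c j : Int) : Bool :=
  decide (0 ≤ r - j) && decide (pvAt grid (r - j) c = "G")
def pvOkD (grid : List (List String)) (r c j : Int) : Bool :=
  decide (r + j < (grid.length : Int)) && decide (pvAt grid (r + j) c = "G")
def pvOkL (grid : List (List String)) (r c j : Int) : Bool :=
  decide (0 ≤ c - j) && decide (pvAt grid r (c - j) = "G")
def pvOkR (grid : List (List String)) (r c j : Int) : Bool :=
  decide (c + j < ((grid.headD []).length : Int)) && decide (pvAt grid r (c + j) = "G")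

-- run predicate on a Boolean list: the cell j places left of i exists and is true
abbrev pvArmP (bs : List Bool) (i j : Nat) : Prop := j ≤ i ∧ bs.getD (i - j) false = true

lemma pvArm_exists (bs : List Bool) (i : Nat) : ∃ j : Nat, ¬ pvArmP bs i (j + 1) :=
  ⟨i, fun h => absurd h.1 (by omega)⟩

lemma pvFindCongr {p q : Nat → Prop} [DecidablePred p] [DecidablePred q]
    (hp : ∃ n, p n) (hq : ∃ n, q n) (h : ∀ n, p n ↔ q n) : Nat.find hp = Nat.find hq :=
  le_antisymm (Nat.find_min' hp ((h _).mpr (Nat.find_spec hq)))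
    (Nat.find_min' hq ((h _).mp (Nat.find_spec hp)))

lemma pvScan_length : ∀ (bs : List Bool) (k : Int), (pvScan bs k).length = bs.length
  | [], _ => rfl
  | _ :: bs, k => by simp [pvScan, pvScan_length bs]

lemma pvScan_getD_succ (b : Bool) (bs : List Bool) (k : Int) (i : Nat) :
    (pvScan (b :: bs) k).getD (i + 1) 0 = (pvScan bs (if b then k + 1 else 0)).getD i 0 := rfl

-- elementwise recurrence of the scan
lemma pvScan_elem : ∀ (bs : List Bool) (k : Int) (i : Nat), i < bs.length →
    (pvScan bs k).getD i 0 =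
      if bs.getD i false = true then (if i = 0 then k else (pvScan bs k).getD (i - 1) 0) + 1 else 0
  | [], _, i, h => by simp at h
  | b :: bs, k, 0, _ => by cases b <;> simp [pvScan]
  | b :: bs, k, i + 1, h => by
    rw [pvScan_getD_succ, pvScan_elem bs _ i (by simpa using h)]
    simp only [List.getD_cons_succ, Nat.add_sub_cancel, if_neg (Nat.succ_ne_zero i)]
    congr 2
    cases i with
    | zero => simp [pvScan]
    | succ m => simp [pvScan]

-- the scan value at a true cell is 1 + the length of the true run strictly before it
lemma pvScanFind (bs : List Bool) : ∀ (i : Nat), i < bs.length → bs.getD i false = true →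
    ∀ (he : ∃ j : Nat, ¬ pvArmP bs i (j + 1)),
      (pvScan bs 0).getD i 0 = (Nat.find he : Int) + 1 := by
  intro i
  induction i using Nat.strong_induction_on with
  | _ i ih =>
    intro hi hb he
    by_cases h1 : pvArmP bs i 1
    · -- the run continues leftward: shift the find by one
      have harm : ∀ n, pvArmP bs i (n + 1 + 1) ↔ pvArmP bs (i - 1) (n + 1) := by
        intro n
        constructor
        · rintro ⟨ha, hb2⟩
          exact ⟨by omega, by rwa [show i - 1 - (n + 1) = i - (n + 1 + 1) from by omega]⟩
        · rintro ⟨ha, hb2⟩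
          refine ⟨by omega, ?_⟩
          rwa [show i - (n + 1 + 1) = i - 1 - (n + 1) from by omega]
      have he' : ∃ j : Nat, ¬ pvArmP bs (i - 1) (j + 1) := pvArm_exists bs (i - 1)
      have h2 : ∃ n, ¬ pvArmP bs i (n + 1 + 1) := by
        obtain ⟨j, hj⟩ := he'
        exact ⟨j, fun h => hj ((harm j).mp h)⟩
      have hfind : Nat.find he = Nat.find h2 + 1 :=
        Nat.find_comp_succ he h2 (not_not_intro h1)
      have hfind2 : Nat.find h2 = Nat.find he' :=
        pvFindCongr h2 he' (fun n => not_congr (harm n))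
      have hIH := ih (i - 1) (by omega) (by omega) h1.2 he'
      rw [pvScan_elem bs 0 i hi, if_pos hb, if_neg (by omega), hIH, hfind, hfind2]
      push_cast
      ring
    · -- the run stops at i: find = 0, value = 1
      have hf : Nat.find he = 0 := (Nat.find_eq_zero he).mpr h1
      rw [hf, pvScan_elem bs 0 i hi, if_pos hb]
      rcases Nat.eq_zero_or_pos i with h0 | hpos
      · simp [h0]
      · have hfalse : bs.getD (i - 1) false = false := by
          by_contra hcon
          exact h1 ⟨hpos, by simpa using hcon⟩
        rw [if_neg (by omega), pvScan_elem bs 0 (i - 1) (by omega), hfalse]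
        simp

-- ---- facts about pvG ----

lemma pvG_row (grid : List (List String)) (rn : Nat) (h : rn < grid.length) :
    (pvG grid).getD rn [] =
      (List.range (grid.headD []).length).map
        (fun cn => (grid.getD rn []).getD cn "" == "G") := by
  unfold pvG
  rw [List.getD_eq_getElem _ _ (by simpa using h)]
  simp only [List.getElem_map, PySem.List.pyRange_zero_natCast, List.map_map]
  apply List.map_congr_left
  intro a _
  simp [Function.comp, List.getElem?_eq_getElem h]

lemma pvG_row_length (grid : List (List String)) (rn : Nat) (h : rn < grid.length) :
    ((pvG grid).getD rn []).length = (grid.headD []).length := by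
  rw [pvG_row grid rn h]; simp

lemma pvG_mem_length (grid : List (List String)) :
    ∀ row ∈ pvG grid, row.length = (grid.headD []).length := by
  intro row hrow
  unfold pvG at hrow
  obtain ⟨r0, _, rfl⟩ := List.mem_map.mp hrow
  simp

lemma pvG_entry (grid : List (List String)) (rn cn : Nat)
    (hr : rn < grid.length) (hc : cn < (grid.headD []).length) :
    ((pvG grid).getD rn []).getD cn false = (pvAt grid (rn : Int) (cn : Int) == "G") := by
  rw [pvG_row grid rn hr, List.getD_eq_getElem _ _ (by simpa using hc)]
  simp [pvAt]

def pvColB (grid : List (List String)) (cn : Nat) : List Bool :=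
  (pvG grid).map (fun row => row.getD cn false)

lemma pvColB_length (grid : List (List String)) (cn : Nat) :
    (pvColB grid cn).length = grid.length := by
  simp [pvColB, pvG]

lemma pvColB_entry (grid : List (List String)) (rn cn : Nat) :
    (pvColB grid cn).getD rn false = ((pvG grid).getD rn []).getD cn false := by
  unfold pvColB
  have h := List.getD_map (pvG grid) ([] : List Bool) (fun row => row.getD cn false) (n := rn)
  simpa using h

-- ---- the up/down table rows project to a column scan ----

lemma pvZipStep_length (row : List Bool) (prev : List Int) (h : prev.length ≤ row.length) :
    (pvZipStep row prev).length = prev.length := by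
  simp [pvZipStep]
  omega

lemma pvZipStep_getD (row : List Bool) (prev : List Int) (cn : Nat)
    (h : cn < prev.length) (h2 : prev.length ≤ row.length) :
    (pvZipStep row prev).getD cn 0 = if row.getD cn false then prev.getD cn 0 + 1 else 0 := by
  have hz : cn < (row.zip prev).length := by simp; omega
  unfold pvZipStep
  rw [List.getD_eq_getElem _ _ (by simpa using hz), List.getElem_map, List.getElem_zip,
      List.getD_eq_getElem _ _ h, List.getD_eq_getElem _ _ (by omega)]

lemma pvUpRows_length : ∀ (gs : List (List Bool)) (prev : List Int),
    (pvUpRows gs prev).length = gs.length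
  | [], _ => rfl
  | row :: gs, prev => by simp [pvUpRows, pvUpRows_length gs]

lemma pvUpRows_col : ∀ (gs : List (List Bool)) (prev : List Int) (cn : Nat),
    cn < prev.length → (∀ row ∈ gs, row.length = prev.length) →
    (pvUpRows gs prev).map (fun t => t.getD cn 0) =
      pvScan (gs.map (fun row => row.getD cn false)) (prev.getD cn 0)
  | [], _, _, _, _ => rfl
  | row :: gs, prev, cn, h, hall => by
    have hrow : row.length = prev.length := hall row List.mem_cons_self
    have hlen : (pvZipStep row prev).length = prev.length := pvZipStep_length row prev hrow.ge
    have hcur : (pvZipStep row prev).getD cn 0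
        = if row.getD cn false then prev.getD cn 0 + 1 else 0 :=
      pvZipStep_getD row prev cn h hrow.ge
    simp only [pvUpRows, List.map_cons, pvScan]
    rw [pvUpRows_col gs (pvZipStep row prev) cn (by omega)
        (fun r0 hr0 => by rw [hlen]; exact hall r0 (List.mem_cons_of_mem _ hr0)), hcur]

-- ---- each table entry at an in-range 'G' cell is 1 + the corresponding arm's find ----

lemma pvTab_up (grid : List (List String)) (r c : Int)
    (hr0 : 0 ≤ r) (hr : r < (grid.length : Int))
    (hc0 : 0 ≤ c) (hc : c < ((grid.headD []).length : Int))
    (hG : pvAt grid r c = "G")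
    (hUe : ∃ j : Nat, pvOkU grid r c ((j : Int) + 1) = false) :
    pvTab (pvUpRows (pvG grid) (List.replicate ((grid.headD []).length : Int).toNat 0)) r c
      = (Nat.find hUe : Int) + 1 := by
  have hr' : r.toNat < grid.length := by omega
  have hc' : c.toNat < (grid.headD []).length := by omega
  have hrr : ((r.toNat : Nat) : Int) = r := Int.toNat_of_nonneg hr0
  have hcc : ((c.toNat : Nat) : Int) = c := Int.toNat_of_nonneg hc0
  unfold pvTab
  have hmap := List.getD_map (pvUpRows (pvG grid)
      (List.replicate ((grid.headD []).length : Int).toNat 0)) ([] : List Int)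
      (fun t => t.getD c.toNat 0) (n := r.toNat)
  simp only [List.getD_nil] at hmap
  rw [← hmap, pvUpRows_col (pvG grid) _ c.toNat (by simpa using hc') (by
      intro row hrow
      rw [pvG_mem_length grid row hrow]
      simp)]
  have hcol : (pvG grid).map (fun row => row.getD c.toNat false) = pvColB grid c.toNat := rfl
  rw [hcol, show (List.replicate ((grid.headD []).length : Int).toNat (0 : Int)).getD c.toNat 0
      = (0 : Int) from by simp [List.getD]]
  rw [pvScanFind (pvColB grid c.toNat) r.toNat (by rw [pvColB_length]; exact hr')
      (by rw [pvColB_entry grid r.toNat c.toNat, pvG_entry grid r.toNat c.toNat hr' hc',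
              hrr, hcc, hG]; rfl)
      (pvArm_exists _ _)]
  have hfind : Nat.find (pvArm_exists (pvColB grid c.toNat) r.toNat) = Nat.find hUe := by
    apply pvFindCongr
    intro j
    rw [← Bool.not_eq_true]
    apply not_congr
    constructor
    · rintro ⟨hj, hb⟩
      rw [pvColB_entry grid _ c.toNat, pvG_entry grid _ c.toNat (by omega) hc'] at hb
      simp only [pvOkU, Bool.and_eq_true, decide_eq_true_eq]
      constructor
      · omega
      · rw [show r - ((j : Int) + 1) = ((r.toNat - (j + 1) : Nat) : Int) from by omega]
        simpa [hcc] using hb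
    · intro hb
      simp only [pvOkU, Bool.and_eq_true, decide_eq_true_eq] at hb
      obtain ⟨hj, hb⟩ := hb
      refine ⟨by omega, ?_⟩
      rw [pvColB_entry grid _ c.toNat, pvG_entry grid _ c.toNat (by omega) hc']
      rw [show ((r.toNat - (j + 1) : Nat) : Int) = r - ((j : Int) + 1) from by omega, hcc]
      simpa using hb
  rw [hfind]

lemma pvTab_down (grid : List (List String)) (r c : Int)
    (hr0 : 0 ≤ r) (hr : r < (grid.length : Int))
    (hc0 : 0 ≤ c) (hc : c < ((grid.headD []).length : Int))
    (hG : pvAt grid r c = "G")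
    (hDe : ∃ j : Nat, pvOkD grid r c ((j : Int) + 1) = false) :
    pvTab ((pvUpRows (pvG grid).reverse
        (List.replicate ((grid.headD []).length : Int).toNat 0)).reverse) r c
      = (Nat.find hDe : Int) + 1 := by
  have hr' : r.toNat < grid.length := by omega
  have hc' : c.toNat < (grid.headD []).length := by omega
  have hrr : ((r.toNat : Nat) : Int) = r := Int.toNat_of_nonneg hr0
  have hcc : ((c.toNat : Nat) : Int) = c := Int.toNat_of_nonneg hc0
  have hlenT : (pvUpRows (pvG grid).reverse
      (List.replicate ((grid.headD []).length : Int).toNat 0)).length = grid.length := by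
    rw [pvUpRows_length]; simp [pvG]
  unfold pvTab
  rw [List.getD_reverse _ (by rw [hlenT]; exact hr'), hlenT]
  have hmap := List.getD_map (pvUpRows (pvG grid).reverse
      (List.replicate ((grid.headD []).length : Int).toNat 0)) ([] : List Int)
      (fun t => t.getD c.toNat 0) (n := grid.length - 1 - r.toNat)
  simp only [List.getD_nil] at hmap
  rw [← hmap, pvUpRows_col (pvG grid).reverse _ c.toNat (by simpa using hc') (by
      intro row hrow
      rw [pvG_mem_length grid row (List.mem_reverse.mp hrow)]
      simp), List.map_reverse]
  have hcol : (pvG grid).map (fun row => row.getD c.toNat false) = pvColB grid c.toNat := rfl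
  rw [hcol, show (List.replicate ((grid.headD []).length : Int).toNat (0 : Int)).getD c.toNat 0
      = (0 : Int) from by simp [List.getD]]
  have hlb : (pvColB grid c.toNat).length = grid.length := pvColB_length grid c.toNat
  have hi : grid.length - 1 - r.toNat < (pvColB grid c.toNat).reverse.length := by
    simp [hlb]; omega
  rw [pvScanFind ((pvColB grid c.toNat).reverse) (grid.length - 1 - r.toNat)
      (by simpa using hi)
      (by
        rw [List.getD_reverse _ (by rw [hlb]; omega), hlb,
            show grid.length - 1 - (grid.length - 1 - r.toNat) = r.toNat from by omega,
            pvColB_entry grid r.toNat c.toNat, pvG_entry grid r.toNat c.toNat hr' hc',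
            hrr, hcc, hG]
        rfl)
      (pvArm_exists _ _)]
  have hfind : Nat.find (pvArm_exists ((pvColB grid c.toNat).reverse) (grid.length - 1 - r.toNat))
      = Nat.find hDe := by
    apply pvFindCongr
    intro j
    rw [← Bool.not_eq_true]
    apply not_congr
    constructor
    · rintro ⟨hj, hb⟩
      rw [List.getD_reverse _ (by rw [hlb]; omega), hlb,
          show grid.length - 1 - (grid.length - 1 - r.toNat - (j + 1)) = r.toNat + (j + 1) from by omega,
          pvColB_entry grid _ c.toNat, pvG_entry grid _ c.toNat (by omega) hc'] at hb
      simp only [pvOkD, Bool.and_eq_true, decide_eq_true_eq]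
      constructor
      · omega
      · rw [show r + ((j : Int) + 1) = ((r.toNat + (j + 1) : Nat) : Int) from by omega]
        simpa [hcc] using hb
    · intro hb
      simp only [pvOkD, Bool.and_eq_true, decide_eq_true_eq] at hb
      obtain ⟨hj, hb⟩ := hb
      refine ⟨by omega, ?_⟩
      rw [List.getD_reverse _ (by rw [hlb]; omega), hlb,
          show grid.length - 1 - (grid.length - 1 - r.toNat - (j + 1)) = r.toNat + (j + 1) from by omega,
          pvColB_entry grid _ c.toNat, pvG_entry grid _ c.toNat (by omega) hc']
      rw [show ((r.toNat + (j + 1) : Nat) : Int) = r + ((j : Int) + 1) from by omega, hcc]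
      simpa using hb
  rw [hfind]

lemma pvTab_left (grid : List (List String)) (r c : Int)
    (hr0 : 0 ≤ r) (hr : r < (grid.length : Int))
    (hc0 : 0 ≤ c) (hc : c < ((grid.headD []).length : Int))
    (hG : pvAt grid r c = "G")
    (hLe : ∃ j : Nat, pvOkL grid r c ((j : Int) + 1) = false) :
    pvTab ((pvG grid).map (fun row => pvScan row 0)) r c = (Nat.find hLe : Int) + 1 := by
  have hr' : r.toNat < grid.length := by omega
  have hc' : c.toNat < (grid.headD []).length := by omega
  have hrr : ((r.toNat : Nat) : Int) = r := Int.toNat_of_nonneg hr0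
  have hcc : ((c.toNat : Nat) : Int) = c := Int.toNat_of_nonneg hc0
  unfold pvTab
  have hmap := List.getD_map (pvG grid) ([] : List Bool)
      (fun row => pvScan row 0) (n := r.toNat)
  simp only [show pvScan [] 0 = [] from rfl] at hmap
  rw [hmap]
  have hrowlen : ((pvG grid).getD r.toNat []).length = (grid.headD []).length :=
    pvG_row_length grid r.toNat hr'
  rw [pvScanFind ((pvG grid).getD r.toNat []) c.toNat (by rw [hrowlen]; exact hc')
      (by rw [pvG_entry grid r.toNat c.toNat hr' hc', hrr, hcc, hG]; rfl)
      (pvArm_exists _ _)]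
  have hfind : Nat.find (pvArm_exists ((pvG grid).getD r.toNat []) c.toNat) = Nat.find hLe := by
    apply pvFindCongr
    intro j
    rw [← Bool.not_eq_true]
    apply not_congr
    constructor
    · rintro ⟨hj, hb⟩
      rw [pvG_entry grid r.toNat _ hr' (by omega)] at hb
      simp only [pvOkL, Bool.and_eq_true, decide_eq_true_eq]
      constructor
      · omega
      · rw [show c - ((j : Int) + 1) = ((c.toNat - (j + 1) : Nat) : Int) from by omega]
        simpa [hrr] using hb
    · intro hb
      simp only [pvOkL, Bool.and_eq_true, decide_eq_true_eq] at hb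
      obtain ⟨hj, hb⟩ := hb
      refine ⟨by omega, ?_⟩
      rw [pvG_entry grid r.toNat _ hr' (by omega)]
      rw [show ((c.toNat - (j + 1) : Nat) : Int) = c - ((j : Int) + 1) from by omega, hrr]
      simpa using hb
  rw [hfind]

lemma pvTab_right (grid : List (List String)) (r c : Int)
    (hr0 : 0 ≤ r) (hr : r < (grid.length : Int))
    (hc0 : 0 ≤ c) (hc : c < ((grid.headD []).length : Int))
    (hG : pvAt grid r c = "G")
    (hRe : ∃ j : Nat, pvOkR grid r c ((j : Int) + 1) = false) :
    pvTab ((pvG grid).map (fun row => (pvScan row.reverse 0).reverse)) r c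
      = (Nat.find hRe : Int) + 1 := by
  have hr' : r.toNat < grid.length := by omega
  have hc' : c.toNat < (grid.headD []).length := by omega
  have hrr : ((r.toNat : Nat) : Int) = r := Int.toNat_of_nonneg hr0
  have hcc : ((c.toNat : Nat) : Int) = c := Int.toNat_of_nonneg hc0
  unfold pvTab
  have hmap := List.getD_map (pvG grid) ([] : List Bool)
      (fun row => (pvScan row.reverse 0).reverse) (n := r.toNat)
  simp only [show (pvScan ([] : List Bool).reverse 0).reverse = [] from rfl] at hmap
  rw [hmap]
  have hrowlen : ((pvG grid).getD r.toNat []).length = (grid.headD []).length :=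
    pvG_row_length grid r.toNat hr'
  set row := (pvG grid).getD r.toNat [] with hrowdef
  have hlscan : (pvScan row.reverse 0).length = (grid.headD []).length := by
    rw [pvScan_length]; simp [hrowlen]
  rw [List.getD_reverse _ (by rw [hlscan]; exact hc'), hlscan]
  have hi : (grid.headD []).length - 1 - c.toNat < row.reverse.length := by
    rw [List.length_reverse, hrowlen]; omega
  rw [pvScanFind row.reverse ((grid.headD []).length - 1 - c.toNat)
      (by simpa using hi)
      (by
        rw [List.getD_reverse _ (by rw [hrowlen]; omega), hrowlen,
            show (grid.headD []).length - 1 - ((grid.headD []).length - 1 - c.toNat) = c.toNat from by omega,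
            hrowdef, pvG_entry grid r.toNat c.toNat hr' hc', hrr, hcc, hG]
        rfl)
      (pvArm_exists _ _)]
  have hfind : Nat.find (pvArm_exists row.reverse ((grid.headD []).length - 1 - c.toNat))
      = Nat.find hRe := by
    apply pvFindCongr
    intro j
    rw [← Bool.not_eq_true]
    apply not_congr
    constructor
    · rintro ⟨hj, hb⟩
      rw [List.getD_reverse _ (by rw [hrowlen]; omega), hrowlen,
          show (grid.headD []).length - 1 - ((grid.headD []).length - 1 - c.toNat - (j + 1)) = c.toNat + (j + 1) from by omega,
          hrowdef, pvG_entry grid r.toNat _ hr' (by omega)] at hb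
      simp only [pvOkR, Bool.and_eq_true, decide_eq_true_eq]
      constructor
      · omega
      · rw [show c + ((j : Int) + 1) = ((c.toNat + (j + 1) : Nat) : Int) from by omega]
        simpa [hrr] using hb
    · intro hb
      simp only [pvOkR, Bool.and_eq_true, decide_eq_true_eq] at hb
      obtain ⟨hj, hb⟩ := hb
      refine ⟨by omega, ?_⟩
      rw [List.getD_reverse _ (by rw [hrowlen]; omega), hrowlen,
          show (grid.headD []).length - 1 - ((grid.headD []).length - 1 - c.toNat - (j + 1)) = c.toNat + (j + 1) from by omega,
          hrowdef, pvG_entry grid r.toNat _ hr' (by omega)]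
      rw [show ((c.toNat + (j + 1) : Nat) : Int) = c + ((j : Int) + 1) from by omega, hrr]
      simpa using hb
  rw [hfind]

-- ---- A's loop, characterised (as in the break condition) ----

lemma pvBreak_false_iff (grid : List (List String)) (r c l : Int) :
    pvBreak grid (grid.length : Int) ((grid.headD []).length : Int) r c l = false ↔
      (pvOkU grid r c l = true ∧ pvOkD grid r c l = true ∧
       pvOkL grid r c l = true ∧ pvOkR grid r c l = true) := by
  simp only [pvBreak, pvOkU, pvOkD, pvOkL, pvOkR, Bool.or_eq_false_iff, Bool.and_eq_true,
    decide_eq_false_iff_not, decide_eq_true_eq, not_lt, not_le, ne_eq, not_not]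
  tauto

lemma pvBreak_true_iff (grid : List (List String)) (r c l : Int) :
    pvBreak grid (grid.length : Int) ((grid.headD []).length : Int) r c l = true ↔
      (pvOkU grid r c l = false ∨ pvOkD grid r c l = false ∨
       pvOkL grid r c l = false ∨ pvOkR grid r c l = false) := by
  rw [← Bool.not_eq_false, pvBreak_false_iff]
  simp only [not_and_or, Bool.not_eq_true]

lemma pvALoop_eq (grid : List (List String)) (rows cols r c : Int) :
    ∀ (n f : Nat) (l : Int) (acc : List (Int × (List (Int × Int)))), n < f →
      (∀ j : Nat, j < n → pvBreak grid rows cols r c (l + j) = false) →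
      pvBreak grid rows cols r c (l + n) = true →
      pvALoop grid rows cols r c f l acc =
        acc ++ (List.range n).map (fun (j : Nat) => (1 + (l + (j : Int)) * 4, pvCells r c (l + (j : Int)))) := by
  intro n
  induction n with
  | zero =>
    intro f l acc hf _ hstop
    cases f with
    | zero => omega
    | succ f =>
      simp only [Nat.cast_zero, add_zero] at hstop
      simp [pvALoop, hstop]
  | succ n ih =>
    intro f l acc hf hok hstop
    cases f with
    | zero => omega
    | succ f =>
      have h0 : pvBreak grid rows cols r c l = false := by
        have := hok 0 (Nat.succ_pos n); simpa using this
      simp only [pvALoop, h0, Bool.false_eq_true, if_false]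
      rw [ih f (l + 1) (acc ++ [(1 + l * 4, pvCells r c l)]) (by omega)
        (fun j hj => by
          have := hok (j + 1) (by omega)
          have e : l + 1 + (j : Int) = l + ((j + 1 : Nat) : Int) := by push_cast; ring
          rw [e]; exact this)
        (by
          have e : l + 1 + (n : Int) = l + ((n + 1 : Nat) : Int) := by push_cast; ring
          rw [e]; exact hstop)]
      rw [List.range_succ_eq_map, List.map_cons, List.map_map, List.append_assoc]
      simp only [Nat.cast_zero, add_zero, List.singleton_append]
      congr 2
      apply List.map_congr_left
      intro j _
      simp only [Function.comp]
      congr 2 <;> push_cast <;> ring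

-- the incremental step of B's generator advances pvCells by one length
lemma pvCells_succ (r c : Int) (t : Nat) :
    pvCells r c ((t : Int) + 1) =
      (((PySem.Set.add (pvCells r c (t : Int)) (r - ((t : Int) + 1), c)).add (r + ((t : Int) + 1), c)).add
        (r, c - ((t : Int) + 1))).add (r, c + ((t : Int) + 1)) := by
  unfold pvCells
  rw [PySem.List.pyRange_one_succ_right (by omega : (1 : Int) ≤ (t : Int) + 1), List.foldl_append]
  rfl

-- B's generator fold, characterised
lemma pvBFold (r c : Int) (K : Nat) (acc0 : List (Int × (List (Int × Int)))) :
    ((PySem.List.pyRange 1 ((K : Int) + 1) 1).foldl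
        (fun (st : PySem.Set (Int × Int) × List (Int × (List (Int × Int)))) n =>
          let cs := (((PySem.Set.add st.1 (r - n, c)).add (r + n, c)).add (r, c - n)).add (r, c + n)
          (cs, st.2 ++ [(1 + 4 * n, cs)]))
        (pvCells r c 0, acc0)) =
      (pvCells r c (K : Int),
       acc0 ++ (List.range K).map (fun (j : Nat) => (1 + 4 * ((j : Int) + 1), pvCells r c ((j : Int) + 1)))) := by
  induction K with
  | zero => simp [PySem.List.pyRange]
  | succ K ih =>
    have e : ((K + 1 : Nat) : Int) + 1 = ((K : Int) + 1) + 1 := by push_cast; ring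
    rw [e, PySem.List.pyRange_one_succ_right (by omega : (1 : Int) ≤ (K : Int) + 1),
      List.foldl_append, ih]
    simp only [List.foldl_cons, List.foldl_nil, List.range_succ, List.map_append, List.map_cons,
      List.map_nil, ← List.append_assoc]
    rw [← pvCells_succ r c K]
    push_cast
    constructor

-- pvGB agrees with A's cell test on in-range indices
lemma pvGB_eq (grid : List (List String)) (r c : Int)
    (hr0 : 0 ≤ r) (hr : r < (grid.length : Int))
    (hc0 : 0 ≤ c) (hc : c < ((grid.headD []).length : Int)) :
    pvGB (pvG grid) r c = (pvAt grid r c == "G") := by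
  unfold pvGB
  have h := pvG_entry grid r.toNat c.toNat (by omega) (by omega)
  rwa [Int.toNat_of_nonneg hr0, Int.toNat_of_nonneg hc0] at h

-- the per-'G'-cell equivalence: A's while loop = B's table-min generation
lemma pvCell_eq (grid : List (List String)) (r c : Int)
    (hr0 : 0 ≤ r) (hr : r < (grid.length : Int))
    (hc0 : 0 ≤ c) (hc : c < ((grid.headD []).length : Int))
    (hG : pvAt grid r c = "G") (acc : List (Int × (List (Int × Int)))) :
    pvALoop grid (grid.length : Int) ((grid.headD []).length : Int) r c (grid.length + 1) 0 acc =
      pvBGen r c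
        (min (min (min
            (pvTab (pvUpRows (pvG grid) (List.replicate ((grid.headD []).length : Int).toNat 0)) r c)
            (pvTab ((pvUpRows (pvG grid).reverse (List.replicate ((grid.headD []).length : Int).toNat 0)).reverse) r c))
            (pvTab ((pvG grid).map (fun row => pvScan row 0)) r c))
            (pvTab ((pvG grid).map (fun row => (pvScan row.reverse 0).reverse)) r c) - 1)
        acc := by
  -- first-failure indices of the four arm predicates
  have hU0 : pvOkU grid r c ((r.toNat : Int) + 1) = false := by
    simp only [pvOkU, Bool.and_eq_false_iff, decide_eq_false_iff_not, not_le]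
    left; omega
  have hD0 : pvOkD grid r c ((grid.length : Int) + 1) = false := by
    simp only [pvOkD, Bool.and_eq_false_iff, decide_eq_false_iff_not, not_lt]
    left; omega
  have hL0 : pvOkL grid r c ((c.toNat : Int) + 1) = false := by
    simp only [pvOkL, Bool.and_eq_false_iff, decide_eq_false_iff_not, not_le]
    left; omega
  have hR0 : pvOkR grid r c (((grid.headD []).length : Int) + 1) = false := by
    simp only [pvOkR, Bool.and_eq_false_iff, decide_eq_false_iff_not, not_lt]
    left; omega
  have hUe : ∃ j : Nat, pvOkU grid r c ((j : Int) + 1) = false := ⟨r.toNat, hU0⟩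
  have hDe : ∃ j : Nat, pvOkD grid r c ((j : Int) + 1) = false := ⟨grid.length, by exact_mod_cast hD0⟩
  have hLe : ∃ j : Nat, pvOkL grid r c ((j : Int) + 1) = false := ⟨c.toNat, hL0⟩
  have hRe : ∃ j : Nat, pvOkR grid r c ((j : Int) + 1) = false := ⟨(grid.headD []).length, by exact_mod_cast hR0⟩
  set mU := Nat.find hUe with hmU
  set mD := Nat.find hDe with hmD
  set mL := Nat.find hLe with hmL
  set mR := Nat.find hRe with hmR
  have hbU : Nat.find hUe ≤ r.toNat := Nat.find_min' hUe hU0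
  have hbD : Nat.find hDe ≤ grid.length := Nat.find_min' hDe (by exact_mod_cast hD0)
  have hbL : Nat.find hLe ≤ c.toNat := Nat.find_min' hLe hL0
  have hbR : Nat.find hRe ≤ (grid.headD []).length := Nat.find_min' hRe (by exact_mod_cast hR0)
  have hrlt : r.toNat < grid.length := by omega
  have hclt : c.toNat < (grid.headD []).length := by omega
  set K : Nat := min (min (min mU mD) mL) mR with hK
  have hKU : K ≤ mU := by omega
  have hKD : K ≤ mD := by omega
  have hKL : K ≤ mL := by omega
  have hKR : K ≤ mR := by omega
  -- the table values
  have htU := pvTab_up grid r c hr0 hr hc0 hc hG hUe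
  have htD := pvTab_down grid r c hr0 hr hc0 hc hG hDe
  have htL := pvTab_left grid r c hr0 hr hc0 hc hG hLe
  have htR := pvTab_right grid r c hr0 hr hc0 hc hG hRe
  rw [htU, htD, htL, htR]
  have hLK : min (min (min ((mU : Int) + 1) ((mD : Int) + 1)) ((mL : Int) + 1)) ((mR : Int) + 1) - 1
      = (K : Int) := by
    rw [hK]; push_cast
    simp only [min_def]
    split_ifs <;> omega
  rw [hLK]
  -- the initial cells set
  have hcells0 : (PySem.Set.ofList [(r, c)] : PySem.Set (Int × Int)) = pvCells r c 0 := by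
    unfold pvCells
    norm_num [PySem.List.pyRange_one]
    rfl
  -- B's side
  have hB : pvBGen r c (K : Int) acc =
      (acc ++ [(1, pvCells r c 0)]) ++
        (List.range K).map (fun (j : Nat) => (1 + 4 * ((j : Int) + 1), pvCells r c ((j : Int) + 1))) := by
    unfold pvBGen
    simp only [hcells0]
    rw [pvBFold r c K (acc ++ [(1, pvCells r c 0)])]
  -- A's side: the while loop runs exactly K+1 times
  have hok : ∀ j : Nat, j < K + 1 →
      pvBreak grid (grid.length : Int) ((grid.headD []).length : Int) r c ((0 : Int) + (j : Int)) = false := by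
    intro j hj
    rw [zero_add, pvBreak_false_iff]
    cases j with
    | zero =>
      refine ⟨?_, ?_, ?_, ?_⟩ <;>
        simp only [pvOkU, pvOkD, pvOkL, pvOkR, Nat.cast_zero, sub_zero, add_zero, hG,
          Bool.and_eq_true, decide_eq_true_eq] <;> exact ⟨by omega, trivial⟩
    | succ i =>
      have hcast : ((i + 1 : Nat) : Int) = (i : Int) + 1 := by push_cast; ring
      rw [hcast]
      refine ⟨?_, ?_, ?_, ?_⟩
      · have := Nat.find_min hUe (show i < mU by omega); simpa using this
      · have := Nat.find_min hDe (show i < mD by omega); simpa using this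
      · have := Nat.find_min hLe (show i < mL by omega); simpa using this
      · have := Nat.find_min hRe (show i < mR by omega); simpa using this
  have hstop : pvBreak grid (grid.length : Int) ((grid.headD []).length : Int) r c ((0 : Int) + ((K + 1 : Nat) : Int)) = true := by
    rw [zero_add, pvBreak_true_iff]
    have hch : K = mU ∨ K = mD ∨ K = mL ∨ K = mR := by omega
    have hcast : ((K + 1 : Nat) : Int) = (K : Int) + 1 := by push_cast; ring
    rw [hcast]
    rcases hch with h | h | h | h
    · exact Or.inl (by rw [h]; exact Nat.find_spec hUe)
    · exact Or.inr (Or.inl (by rw [h]; exact Nat.find_spec hDe))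
    · exact Or.inr (Or.inr (Or.inl (by rw [h]; exact Nat.find_spec hLe)))
    · exact Or.inr (Or.inr (Or.inr (by rw [h]; exact Nat.find_spec hRe)))
  rw [pvALoop_eq grid (grid.length : Int) ((grid.headD []).length : Int) r c (K + 1)
      (grid.length + 1) 0 acc (by omega) hok hstop, hB]
  -- the two generated lists coincide
  rw [List.range_succ_eq_map, List.map_cons, List.map_map, List.append_assoc]
  simp only [Nat.cast_zero, add_zero, zero_add, List.singleton_append]
  norm_num
  intro a _
  ring

theorem pv_main (grid : List (List String)) : get_pluses grid = get_pluses_alt grid := by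
  simp only [get_pluses, get_pluses_alt]
  apply PySem.List.foldl_congr_mem'
  intro r hr acc
  apply PySem.List.foldl_congr_mem'
  intro c hc acc'
  rw [PySem.List.mem_pyRange_one] at hr hc
  have hgb := pvGB_eq grid r c hr.1 hr.2 hc.1 hc.2
  by_cases hG : pvAt grid r c = "G"
  · rw [hgb]
    simp only [hG, ne_eq, not_true_eq_false, if_false, beq_self_eq_true]
    rw [if_neg (by simp)]
    exact pvCell_eq grid r c hr.1 hr.2 hc.1 hc.2 hG acc'
  · rw [hgb]
    simp [hG]

-- ===== VERDICT (by name: the statement is the Claim_ definition above) =====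
theorem get_pluses_spec : Claim_equal_get_pluses := by
  intro grid _dom _pre
  unfold Spec_get_pluses
  exact pv_main grid
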